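-- pv_equiv track=rewrite | github.com/dorbarker/kmer-mlst | acm.py | refine_matches
-- ===== SOURCE A (Python) =====
-- from functools import partial, reduce
-- import itertools
-- from typing import List, Dict, Set, Union, Tuple, Generator
--
-- Position = Tuple[int, int]
--
-- def coverage(alignment: List[int],
--              covered_ranges: List[Position],
--              count: int
--              ) -> List[int]:
--
--     for interval in covered_ranges:
--         for position in range(*interval):
--             alignment[position] += count
--
--     return alignment
--
-- def refine_matches(allele_matches, alleles_kmers, kmer_scheme, kmer_counts):
--
--     # Take the allele_matches counts
--
--     # TODO: Refactor mutating processing of allele_matches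
--
--     for locus, alleles in allele_matches.items():
--
--         kmers_in_alleles = itertools.chain.from_iterable(alleles_kmers[locus].values())
--         union_kmers_in_alleles = set(kmers_in_alleles)
--
--         common_kmers = set(reduce(set.intersection,
--                                   alleles_kmers[locus].values(),
--                                   union_kmers_in_alleles))
--
--         # For each allele, loop over alleles_kmers and subtract any kmers that hit
--         # all targets
--         for allele in alleles:
--             for kmer in common_kmers:
--
--                 alignment = allele_matches[locus][allele]
--                 covered_ranges = kmer_scheme[kmer][locus][allele]
--
--                 # because we're subtracting
--                 negative_count = -1 * kmer_counts[kmer]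
--
--                 alignment = coverage(alignment, covered_ranges, negative_count)
--
--
--                 allele_matches[locus][allele] = alignment
--
--
--     return allele_matches
-- ===== SOURCE B (Python) =====
-- def refine_matches(allele_matches, alleles_kmers, kmer_scheme, kmer_counts):
--     # Builds a fresh result (A mutates allele_matches in place); per allele, the
--     # per-position increment loops are replaced by a difference array over the
--     # interval endpoints followed by one running-prefix-sum sweep.
--     refined = {}
--
--     for locus, alleles in allele_matches.items():
--
--         pools = list(alleles_kmers[locus].values())
--         union = list(dict.fromkeys(k for pool in pools for k in pool))
--         common = [k for k in union if all(k in pool for pool in pools)]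
--
--         new_alleles = {}
--         for allele, alignment in alleles.items():
--             n = len(alignment)
--             diff = [0] * (n + 1)
--             for kmer in common:
--                 count = kmer_counts[kmer]
--                 for start, stop in kmer_scheme[kmer][locus][allele]:
--                     if start < stop:
--                         diff[start] -= count
--                         diff[stop] += count
--             running = 0
--             out = []
--             for pos, value in enumerate(alignment):
--                 running += diff[pos]
--                 out.append(value + running)
--             new_alleles[allele] = out
--         refined[locus] = new_alleles
--
--     return refined
-- ===== Notes on version B (the rewrite author's own statement) =====
-- stated objective: alternative
-- what changed: Per allele, the nested per-position increment loops over each covered range are replaced by a difference array updated only at interval endpoints followed by a single prefix-sum sweep; the reduce-of-set-intersections becomes a filter of the deduplicated kmer union, and the in-place dict mutation becomes a freshly built result dict.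
import Mathlib
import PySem

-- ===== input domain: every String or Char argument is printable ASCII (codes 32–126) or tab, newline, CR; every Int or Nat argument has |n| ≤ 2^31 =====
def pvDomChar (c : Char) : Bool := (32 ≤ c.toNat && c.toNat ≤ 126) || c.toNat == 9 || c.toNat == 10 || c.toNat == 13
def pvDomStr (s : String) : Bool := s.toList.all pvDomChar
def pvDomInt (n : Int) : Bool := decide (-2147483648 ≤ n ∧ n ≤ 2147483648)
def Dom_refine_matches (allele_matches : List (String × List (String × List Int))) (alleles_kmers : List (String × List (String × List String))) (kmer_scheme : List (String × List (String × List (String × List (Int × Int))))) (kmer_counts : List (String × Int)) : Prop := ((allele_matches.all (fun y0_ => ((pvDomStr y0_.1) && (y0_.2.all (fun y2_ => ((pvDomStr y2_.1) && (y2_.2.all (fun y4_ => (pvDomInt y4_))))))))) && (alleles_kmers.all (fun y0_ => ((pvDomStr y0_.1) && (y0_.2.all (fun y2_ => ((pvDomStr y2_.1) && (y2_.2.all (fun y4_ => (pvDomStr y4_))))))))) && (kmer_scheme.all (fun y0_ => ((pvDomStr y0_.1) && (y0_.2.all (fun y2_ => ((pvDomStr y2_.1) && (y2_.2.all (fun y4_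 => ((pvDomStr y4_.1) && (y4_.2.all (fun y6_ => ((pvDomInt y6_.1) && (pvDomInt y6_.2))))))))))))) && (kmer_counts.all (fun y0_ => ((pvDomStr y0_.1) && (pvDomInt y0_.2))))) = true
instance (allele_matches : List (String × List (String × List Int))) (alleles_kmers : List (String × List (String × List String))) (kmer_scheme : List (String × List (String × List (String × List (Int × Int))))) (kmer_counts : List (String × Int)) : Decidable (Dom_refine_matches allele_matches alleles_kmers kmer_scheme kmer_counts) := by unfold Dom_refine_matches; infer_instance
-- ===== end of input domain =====

-- B replaces the per-position increment loops by an endpoint difference array plus one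
-- prefix-sum sweep (alternative algorithm, same results); Python A mutates allele_matches
-- in place and returns it, B builds a fresh dict — the equivalence is about the return value.

-- shared dict-lookup helpers (Python d[k]; Pre_ guarantees the key is present)
def dGetD {β : Type} (d : List (String × β)) (k : String) (dflt : β) : β :=
  (PySem.Dict.mk d).getD k dflt

def dHas {β : Type} (d : List (String × β)) (k : String) : Bool :=
  (PySem.Dict.mk d).contains k

-- ===== PORT A =====
-- def coverage: the nested per-position += loops
def pyCoverage (alignment : List Int) (covered_ranges : List (Int × Int)) (count : Int) : List Int :=
  covered_ranges.foldl
    (fun alignment interval =>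
      (PySem.List.pyRange interval.1 interval.2 1).foldl
        (fun alignment position =>
          PySem.List.pySetD alignment position (PySem.List.pyGetD alignment position 0 + count))
        alignment)
    alignment

-- 'for kmer in common_kmers' iterates a Python set in unspecified order; the updates are
-- additive, so the result does not depend on it — the port folds in first-insertion order.
def refine_matches (allele_matches : List (String × List (String × List Int))) (alleles_kmers : List (String × List (String × List String))) (kmer_scheme : List (String × List (String × List (String × List (Int × Int))))) (kmer_counts : List (String × Int)) : List (String × List (String × List Int)) :=
  allele_matches.map (fun la =>
    let locus := la.1
    let pools := (dGetD alleles_kmers locus []).map Prod.snd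
    let union_kmers_in_alleles := PySem.Set.ofList pools.flatten
    let common_kmers : PySem.Set String :=
      PySem.Set.ofList (pools.foldl (fun s v => PySem.Set.inter s v) union_kmers_in_alleles)
    (locus, la.2.map (fun aa =>
      let allele := aa.1
      (allele,
        common_kmers.foldl (fun alignment kmer =>
          let covered_ranges := dGetD (dGetD (dGetD kmer_scheme kmer []) locus []) allele []
          let negative_count := -1 * dGetD kmer_counts kmer 0
          pyCoverage alignment covered_ranges negative_count)
          (dGetD (dGetD allele_matches locus []) allele [])))))

-- ===== PORT B =====
def refine_matches_alt (allele_matches : List (String × List (String × List Int))) (alleles_kmers : List (String × List (String × List String))) (kmer_scheme : List (String × List (String × List (String × List (Int × Int))))) (kmer_counts : List (String × Int)) : List (String × List (String × List Int)) :=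
  allele_matches.foldl (fun refined la =>
    let locus := la.1
    let pools := (dGetD alleles_kmers locus []).map Prod.snd
    let union := PySem.List.dedup pools.flatten
    let common := union.filter (fun k => pools.all (fun pool => pool.contains k))
    let new_alleles := la.2.foldl (fun acc aa =>
      let n := aa.2.length
      let diff := common.foldl (fun diff kmer =>
        let count := dGetD kmer_counts kmer 0
        (dGetD (dGetD (dGetD kmer_scheme kmer []) locus []) aa.1 []).foldl
          (fun diff iv =>
            if iv.1 < iv.2 then
              let d1 := PySem.List.pySetD diff iv.1 (PySem.List.pyGetD diff iv.1 0 - count)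
              PySem.List.pySetD d1 iv.2 (PySem.List.pyGetD d1 iv.2 0 + count)
            else diff)
          diff)
        (List.replicate (n + 1) (0 : Int))
      let out := ((PySem.List.enumerate aa.2 0).foldl
          (fun (st : List Int × Int) pv =>
            let running := st.2 + PySem.List.pyGetD diff pv.1 0
            (st.1 ++ [pv.2 + running], running))
          (([] : List Int), (0 : Int))).1
      acc ++ [(aa.1, out)]) []
    refined ++ [(locus, new_alleles)]) []

-- ===== PRECONDITION & SPEC =====
-- kmer is in every allele's kmer pool of the locus (and in at least one, so loci
-- without pools have no common kmers) — this is what A's reduce-intersection selects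
def isCommon (pools : List (List String)) (k : String) : Bool :=
  pools.any (fun pool => pool.contains k) && pools.all (fun pool => pool.contains k)

-- Pre_ excludes inputs on which a dict lookup raises KeyError or an alignment index raises
-- IndexError, and (one exclusion where A still returns) inputs whose covered intervals start
-- at a NEGATIVE index: Python then silently wraps the updates around to the end of the
-- alignment array, an accident of list indexing that B's single sweep does not reproduce.
-- The Nodup conditions only say the association lists denote dicts (Python can never pass
-- a dict with duplicate keys).
def Pre_refine_matches (allele_matches : List (String × List (String × List Int))) (alleles_kmers : List (String × List (String × List String))) (kmer_scheme : List (String × List (String × List (String × List (Int × Int))))) (kmer_counts : List (String × Int)) : Prop :=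
  (allele_matches.map Prod.fst).Nodup ∧
  ∀ la ∈ allele_matches,
    ((la.2.map Prod.fst).Nodup ∧ dHas alleles_kmers la.1 = true) ∧
    ∀ aa ∈ la.2, ∀ kmer ∈ ((dGetD alleles_kmers la.1 []).map Prod.snd).flatten,
      isCommon ((dGetD alleles_kmers la.1 []).map Prod.snd) kmer = true →
        dHas kmer_counts kmer = true ∧
        dHas kmer_scheme kmer = true ∧
        dHas (dGetD kmer_scheme kmer []) la.1 = true ∧
        dHas (dGetD (dGetD kmer_scheme kmer []) la.1 []) aa.1 = true ∧
        ∀ iv ∈ dGetD (dGetD (dGetD kmer_scheme kmer []) la.1 []) aa.1 [],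
          iv.1 < iv.2 → 0 ≤ iv.1 ∧ iv.2 ≤ (aa.2.length : Int)

instance (allele_matches : List (String × List (String × List Int))) (alleles_kmers : List (String × List (String × List String))) (kmer_scheme : List (String × List (String × List (String × List (Int × Int))))) (kmer_counts : List (String × Int)) : Decidable (Pre_refine_matches allele_matches alleles_kmers kmer_scheme kmer_counts) := by unfold Pre_refine_matches; infer_instance

def pvWitness_refine_matches : (List (String × List (String × List Int))) × (List (String × List (String × List String))) × (List (String × List (String × List (String × List (Int × Int))))) × (List (String × Int)) :=
  ([("L", [("a", [1, 2, 3]), ("b", [0, 4])])],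
   [("L", [("a", ["k", "m"]), ("b", ["k"])])],
   [("k", [("L", [("a", [(0, 2)]), ("b", [(1, 2)])])]), ("m", [("L", [("a", [(2, 3)])])])],
   [("k", 1), ("m", 2)])

def Spec_refine_matches (allele_matches : List (String × List (String × List Int))) (alleles_kmers : List (String × List (String × List String))) (kmer_scheme : List (String × List (String × List (String × List (Int × Int))))) (kmer_counts : List (String × Int)) (out : List (String × List (String × List Int))) : Prop := out = refine_matches_alt allele_matches alleles_kmers kmer_scheme kmer_counts
instance (allele_matches : List (String × List (String × List Int))) (alleles_kmers : List (String × List (String × List String))) (kmer_scheme : List (String × List (String × List (String × List (Int × Int))))) (kmer_counts : List (String × Int)) (out : List (String × List (String × List Int))) : Decidable (Spec_refine_matches allele_matches alleles_kmers kmer_scheme kmer_counts out) := by unfold Spec_refine_matches; infer_instance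

-- ===== CLAIM (what is proved, stated in full; the proofs are below) =====
def Claim_equal_refine_matches : Prop := ∀ (allele_matches : List (String × List (String × List Int))) (alleles_kmers : List (String × List (String × List String))) (kmer_scheme : List (String × List (String × List (String × List (Int × Int))))) (kmer_counts : List (String × Int)), Dom_refine_matches allele_matches alleles_kmers kmer_scheme kmer_counts → Pre_refine_matches allele_matches alleles_kmers kmer_scheme kmer_counts → Spec_refine_matches allele_matches alleles_kmers kmer_scheme kmer_counts (refine_matches allele_matches alleles_kmers kmer_scheme kmer_counts)

-- ===== LEMMAS AND PROOFS =====


theorem getD_set (xs : List Int) (i : Nat) (v : Int) (j : Nat) :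
    (xs.set i v).getD j 0 = if j = i ∧ i < xs.length then v else xs.getD j 0 := by
  rcases Nat.lt_or_ge j xs.length with hj | hj
  · rw [List.getD_eq_getElem _ _ (by simpa using hj), List.getD_eq_getElem _ _ hj,
      List.getElem_set]
    by_cases h : j = i ∧ i < xs.length
    · rw [if_pos h.1.symm, if_pos h]
    · have hne : ¬ i = j := fun e => h ⟨e.symm, e ▸ hj⟩
      rw [if_neg hne, if_neg h]
  · rw [List.getD_eq_default _ _ (by simpa using hj), List.getD_eq_default _ _ hj]
    split_ifs with h1 <;> [omega; rfl]

theorem cov_one (a b cnt : Int) (al : List Int)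
    (hb : a < b → 0 ≤ a ∧ b ≤ (al.length : Int)) :
    ((PySem.List.pyRange a b 1).foldl
        (fun al p => PySem.List.pySetD al p (PySem.List.pyGetD al p 0 + cnt)) al).length = al.length ∧
    ∀ j : Nat, j < al.length →
      ((PySem.List.pyRange a b 1).foldl
        (fun al p => PySem.List.pySetD al p (PySem.List.pyGetD al p 0 + cnt)) al).getD j 0
      = al.getD j 0 + (if a ≤ (j : Int) ∧ (j : Int) < b then cnt else 0) := by
  induction hm : (b - a).toNat generalizing a al with
  | zero =>
    have hab : b ≤ a := by omega
    rw [PySem.List.pyRange_one_eq_nil hab]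
    refine ⟨rfl, fun j hj => ?_⟩
    have hno : ¬ (a ≤ (j : Int) ∧ (j : Int) < b) := by omega
    simp only [List.foldl_nil, if_neg hno]; ring
  | succ m ih =>
    have hab : a < b := by omega
    obtain ⟨ha, hbl⟩ := hb hab
    have hal : a.toNat < al.length := by omega
    rw [PySem.List.pyRange_one_cons hab]
    simp only [List.foldl_cons]
    have hset : PySem.List.pySetD al a (PySem.List.pyGetD al a 0 + cnt)
        = al.set a.toNat (al.getD a.toNat 0 + cnt) := by
      rw [PySem.List.pySetD_of_nonneg _ _ ha,
        PySem.List.pyGetD_eq_getElem _ _ ha (by omega),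
        List.getD_eq_getElem _ _ hal]
    rw [hset]
    set al' := al.set a.toNat (al.getD a.toNat 0 + cnt) with hal'
    have hlen' : al'.length = al.length := by simp [hal']
    obtain ⟨ihlen, ihpt⟩ := ih (a + 1) al'
      (fun h => ⟨by omega, by rw [hlen']; omega⟩) (by omega)
    refine ⟨by omega, fun j hj => ?_⟩
    rw [ihpt j (by omega), hal', getD_set]
    by_cases hja : j = a.toNat
    · have h1 : a ≤ (j : Int) ∧ (j : Int) < b := by omega
      have h2 : ¬ (a + 1 ≤ (j : Int) ∧ (j : Int) < b) := by omega
      rw [if_pos ⟨hja, hal⟩, if_pos h1, if_neg h2, hja]; ring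
    · have h3 : ¬ (j = a.toNat ∧ a.toNat < al.length) := fun h => hja h.1
      rw [if_neg h3]
      have : (a ≤ (j : Int) ∧ (j : Int) < b) ↔ (a + 1 ≤ (j : Int) ∧ (j : Int) < b) := by
        omega
      rw [if_congr this rfl rfl]

theorem cov_ranges (R : List (Int × Int)) (cnt : Int) (al : List Int)
    (hb : ∀ iv ∈ R, iv.1 < iv.2 → 0 ≤ iv.1 ∧ iv.2 ≤ (al.length : Int)) :
    (pyCoverage al R cnt).length = al.length ∧
    ∀ j : Nat, j < al.length →
      (pyCoverage al R cnt).getD j 0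
      = al.getD j 0 + ((R.map (fun iv => if iv.1 ≤ (j : Int) ∧ (j : Int) < iv.2 then cnt else 0)).sum) := by
  induction R generalizing al with
  | nil => exact ⟨rfl, fun j hj => by simp [pyCoverage]⟩
  | cons iv R ih =>
    obtain ⟨hlen1, hpt1⟩ := cov_one iv.1 iv.2 cnt al (hb iv (by simp))
    set al1 := (PySem.List.pyRange iv.1 iv.2 1).foldl
        (fun al p => PySem.List.pySetD al p (PySem.List.pyGetD al p 0 + cnt)) al with hal1
    obtain ⟨ihlen, ihpt⟩ := ih al1
      (fun iv' hiv' h' => by rw [hlen1]; exact hb iv' (by simp [hiv']) h')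
    have hunf : pyCoverage al (iv :: R) cnt = pyCoverage al1 R cnt := by
      simp [pyCoverage, hal1]
    refine ⟨by rw [hunf, ihlen, hlen1], fun j hj => ?_⟩
    rw [hunf, ihpt j (by omega), hpt1 j hj]
    simp only [List.map_cons, List.sum_cons]
    ring

theorem A_inner (C : List String) (Rf : String → List (Int × Int)) (cf : String → Int)
    (al : List Int)
    (hb : ∀ k ∈ C, ∀ iv ∈ Rf k, iv.1 < iv.2 → 0 ≤ iv.1 ∧ iv.2 ≤ (al.length : Int)) :
    (C.foldl (fun al k => pyCoverage al (Rf k) (-1 * cf k)) al).length = al.length ∧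
    ∀ j : Nat, j < al.length →
      (C.foldl (fun al k => pyCoverage al (Rf k) (-1 * cf k)) al).getD j 0
      = al.getD j 0 +
        (C.map (fun k =>
          ((Rf k).map (fun iv => if iv.1 ≤ (j : Int) ∧ (j : Int) < iv.2 then -1 * cf k else 0)).sum)).sum := by
  induction C generalizing al with
  | nil => exact ⟨rfl, fun j hj => by simp⟩
  | cons k C ih =>
    obtain ⟨hlen1, hpt1⟩ := cov_ranges (Rf k) (-1 * cf k) al (hb k (by simp))
    set al1 := pyCoverage al (Rf k) (-1 * cf k) with hal1
    obtain ⟨ihlen, ihpt⟩ := ih al1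
      (fun k' hk' iv hiv h => by rw [hlen1]; exact hb k' (by simp [hk']) iv hiv h)
    simp only [List.foldl_cons]
    refine ⟨by rw [ihlen, hlen1], fun j hj => ?_⟩
    rw [ihpt j (by omega), hpt1 j hj]
    simp only [List.map_cons, List.sum_cons]
    ring

-- one 'diff[start] -= c; diff[stop] += c' update, pointwise
theorem diff_step (d : List Int) (c a b : Int) (n : Nat) (hd : d.length = n + 1)
    (hab : a < b → 0 ≤ a ∧ b ≤ (n : Int)) :
    ((if a < b then
        PySem.List.pySetD (PySem.List.pySetD d a (PySem.List.pyGetD d a 0 - c)) b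
          (PySem.List.pyGetD (PySem.List.pySetD d a (PySem.List.pyGetD d a 0 - c)) b 0 + c)
      else d)).length = n + 1 ∧
    ∀ j : Nat, j < n + 1 →
      ((if a < b then
        PySem.List.pySetD (PySem.List.pySetD d a (PySem.List.pyGetD d a 0 - c)) b
          (PySem.List.pyGetD (PySem.List.pySetD d a (PySem.List.pyGetD d a 0 - c)) b 0 + c)
      else d)).getD j 0
      = d.getD j 0 + (if a < b then
          (if a = (j : Int) then -c else 0) + (if b = (j : Int) then c else 0) else 0) := by
  by_cases h : a < b
  · obtain ⟨ha, hbn⟩ := hab h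
    have hb0 : (0 : Int) ≤ b := by omega
    have han : a.toNat < d.length := by omega
    have hbn' : b.toNat < d.length := by omega
    have hne : a.toNat ≠ b.toNat := by omega
    have e1 : PySem.List.pySetD d a (PySem.List.pyGetD d a 0 - c)
        = d.set a.toNat (d.getD a.toNat 0 - c) := by
      rw [PySem.List.pySetD_of_nonneg _ _ ha,
        PySem.List.pyGetD_eq_getElem _ _ ha (by omega), List.getD_eq_getElem _ _ han]
    have hlen1 : (d.set a.toNat (d.getD a.toNat 0 - c)).length = d.length := by simp
    have hb1 : b.toNat < (d.set a.toNat (d.getD a.toNat 0 - c)).length := by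
      rw [hlen1]; exact hbn'
    have hd1b : (d.set a.toNat (d.getD a.toNat 0 - c))[b.toNat]'hb1 = d.getD b.toNat 0 := by
      rw [List.getElem_set_ne hne, ← List.getD_eq_getElem _ _ hbn']
    have e2 : PySem.List.pySetD (d.set a.toNat (d.getD a.toNat 0 - c)) b
          (PySem.List.pyGetD (d.set a.toNat (d.getD a.toNat 0 - c)) b 0 + c)
        = (d.set a.toNat (d.getD a.toNat 0 - c)).set b.toNat (d.getD b.toNat 0 + c) := by
      rw [PySem.List.pySetD_of_nonneg _ _ hb0,
        PySem.List.pyGetD_eq_getElem _ _ hb0 (by rw [hlen1]; omega), hd1b]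
    rw [if_pos h, e1, e2]
    refine ⟨by simp [hd], fun j hj => ?_⟩
    rw [getD_set, hlen1, getD_set]
    simp only [if_pos h]
    by_cases hjb : j = b.toNat
    · have hbj : b = (j : Int) := by omega
      have haj : ¬ a = (j : Int) := by omega
      rw [if_pos ⟨hjb, hbn'⟩, if_neg haj, if_pos hbj]
      rw [hjb]; ring
    · have hbj : ¬ b = (j : Int) := by omega
      rw [if_neg (fun hh => hjb hh.1), if_neg hbj]
      by_cases hja : j = a.toNat
      · have haj : a = (j : Int) := by omega
        rw [if_pos ⟨hja, han⟩, if_pos haj, hja]; ring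
      · have haj : ¬ a = (j : Int) := by omega
        rw [if_neg (fun hh => hja hh.1), if_neg haj]; ring
  · rw [if_neg h]
    exact ⟨hd, fun j hj => by rw [if_neg h]; ring⟩

theorem diff_ranges (R : List (Int × Int)) (c : Int) (n : Nat) (d : List Int)
    (hd : d.length = n + 1)
    (hb : ∀ iv ∈ R, iv.1 < iv.2 → 0 ≤ iv.1 ∧ iv.2 ≤ (n : Int)) :
    (R.foldl (fun diff iv =>
        if iv.1 < iv.2 then
          PySem.List.pySetD (PySem.List.pySetD diff iv.1 (PySem.List.pyGetD diff iv.1 0 - c)) iv.2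
            (PySem.List.pyGetD (PySem.List.pySetD diff iv.1 (PySem.List.pyGetD diff iv.1 0 - c)) iv.2 0 + c)
        else diff) d).length = n + 1 ∧
    ∀ j : Nat, j < n + 1 →
      (R.foldl (fun diff iv =>
        if iv.1 < iv.2 then
          PySem.List.pySetD (PySem.List.pySetD diff iv.1 (PySem.List.pyGetD diff iv.1 0 - c)) iv.2
            (PySem.List.pyGetD (PySem.List.pySetD diff iv.1 (PySem.List.pyGetD diff iv.1 0 - c)) iv.2 0 + c)
        else diff) d).getD j 0
      = d.getD j 0 + ((R.map (fun iv =>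
          if iv.1 < iv.2 then
            (if iv.1 = (j : Int) then -c else 0) + (if iv.2 = (j : Int) then c else 0)
          else 0)).sum) := by
  induction R generalizing d with
  | nil => exact ⟨hd, fun j hj => by simp⟩
  | cons iv R ih =>
    obtain ⟨hlen1, hpt1⟩ := diff_step d c iv.1 iv.2 n hd (hb iv (by simp))
    simp only [List.foldl_cons]
    obtain ⟨ihlen, ihpt⟩ := ih _ hlen1 (fun iv' hiv' => hb iv' (by simp [hiv']))
    refine ⟨ihlen, fun j hj => ?_⟩
    rw [ihpt j hj, hpt1 j hj]
    simp only [List.map_cons, List.sum_cons]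
    ring

theorem diff_all (C : List String) (Rf : String → List (Int × Int)) (cf : String → Int)
    (n : Nat) (d : List Int) (hd : d.length = n + 1)
    (hb : ∀ k ∈ C, ∀ iv ∈ Rf k, iv.1 < iv.2 → 0 ≤ iv.1 ∧ iv.2 ≤ (n : Int)) :
    (C.foldl (fun d k => (Rf k).foldl (fun diff iv =>
        if iv.1 < iv.2 then
          PySem.List.pySetD (PySem.List.pySetD diff iv.1 (PySem.List.pyGetD diff iv.1 0 - cf k)) iv.2
            (PySem.List.pyGetD (PySem.List.pySetD diff iv.1 (PySem.List.pyGetD diff iv.1 0 - cf k)) iv.2 0 + cf k)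
        else diff) d) d).length = n + 1 ∧
    ∀ j : Nat, j < n + 1 →
      (C.foldl (fun d k => (Rf k).foldl (fun diff iv =>
        if iv.1 < iv.2 then
          PySem.List.pySetD (PySem.List.pySetD diff iv.1 (PySem.List.pyGetD diff iv.1 0 - cf k)) iv.2
            (PySem.List.pyGetD (PySem.List.pySetD diff iv.1 (PySem.List.pyGetD diff iv.1 0 - cf k)) iv.2 0 + cf k)
        else diff) d) d).getD j 0
      = d.getD j 0 + (C.map (fun k => ((Rf k).map (fun iv =>
          if iv.1 < iv.2 then
            (if iv.1 = (j : Int) then -(cf k) else 0) + (if iv.2 = (j : Int) then cf k else 0)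
          else 0)).sum)).sum := by
  induction C generalizing d with
  | nil => exact ⟨hd, fun j hj => by simp⟩
  | cons k C ih =>
    obtain ⟨hlen1, hpt1⟩ := diff_ranges (Rf k) (cf k) n d hd (hb k (by simp))
    simp only [List.foldl_cons]
    obtain ⟨ihlen, ihpt⟩ := ih _ hlen1 (fun k' hk' => hb k' (by simp [hk']))
    refine ⟨ihlen, fun j hj => ?_⟩
    rw [ihpt j hj, hpt1 j hj]
    simp only [List.map_cons, List.sum_cons]
    ring

theorem sum_shift (D : Int → Int) (s : Int) (m : Nat) :
    ((List.range (m + 1)).map (fun u : Nat => D (s + u))).sum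
    = D s + ((List.range m).map (fun u : Nat => D (s + 1 + u))).sum := by
  rw [List.range_succ_eq_map]
  simp only [List.map_cons, List.map_map, List.sum_cons, Nat.cast_zero, add_zero]
  congr 1
  refine congrArg List.sum (List.map_congr_left ?_)
  intro u hu
  simp only [Function.comp_apply]
  congr 1
  push_cast
  ring

theorem sweep_foldl (diff : List Int) (al : List Int) (s : Int) (acc : List Int) (run : Int) :
    ((PySem.List.enumerate al s).foldl
      (fun (st : List Int × Int) pv =>
        (st.1 ++ [pv.2 + (st.2 + PySem.List.pyGetD diff pv.1 0)],
         st.2 + PySem.List.pyGetD diff pv.1 0)) (acc, run))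
    = (acc ++ (List.range al.length).map (fun t =>
        al.getD t 0 + run + ((List.range (t + 1)).map (fun u : Nat => PySem.List.pyGetD diff (s + u) 0)).sum),
       run + ((List.range al.length).map (fun u : Nat => PySem.List.pyGetD diff (s + u) 0)).sum) := by
  induction al generalizing s acc run with
  | nil => simp [PySem.List.enumerate_nil]
  | cons v al ih =>
    rw [PySem.List.enumerate_cons]
    simp only [List.foldl_cons]
    rw [ih]
    have hsh := sum_shift (fun i => PySem.List.pyGetD diff i 0) s
    simp only [Prod.mk.injEq]
    constructor
    · rw [List.length_cons, List.range_succ_eq_map]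
      simp only [List.map_cons, List.map_map]
      rw [List.append_assoc]
      congr 1
      simp only [List.singleton_append]
      congr 1
      · simp only [List.getD_cons_zero]
        norm_num [List.range_one]
        ring
      · apply List.map_congr_left
        intro t ht
        simp only [Function.comp_apply, List.getD_cons_succ]
        rw [hsh (t + 1)]
        ring
    · rw [List.length_cons, hsh al.length]
      ring

theorem sum_indicator (x v : Int) (m : Nat) :
    ((List.range m).map (fun t : Nat => if x = (t : Int) then v else 0)).sum
    = if 0 ≤ x ∧ x < (m : Int) then v else 0 := by
  induction m with
  | zero => simp
  | succ m ih =>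
    rw [List.range_succ, List.map_append, List.sum_append, ih]
    simp only [List.map_cons, List.map_nil, List.sum_cons, List.sum_nil, add_zero]
    by_cases hx : x = (m : Int)
    · rw [if_pos hx, if_neg (by omega), if_pos (by omega)]; ring
    · rw [if_neg hx]
      by_cases h2 : 0 ≤ x ∧ x < (m : Int)
      · rw [if_pos h2, if_pos (by omega)]; ring
      · rw [if_neg h2, if_neg (by omega)]; ring

theorem sum_exchange {β : Type} (L : List β) (J : List Nat) (g : β → Nat → Int) :
    (J.map (fun t => (L.map (fun x => g x t)).sum)).sum
    = (L.map (fun x => (J.map (g x)).sum)).sum := by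
  induction L with
  | nil => simp
  | cons x L ih =>
    simp only [List.map_cons, List.sum_cons, ← ih]
    rw [← PySem.List.sum_map_add_int]

theorem pair_sum (c a b : Int) (n p : Nat)
    (hab : a < b → 0 ≤ a ∧ b ≤ (n : Int)) :
    ((List.range (p + 1)).map (fun t : Nat =>
      if a < b then (if a = (t : Int) then -c else 0) + (if b = (t : Int) then c else 0) else 0)).sum
    = if a ≤ (p : Int) ∧ (p : Int) < b then -c else 0 := by
  by_cases h : a < b
  · obtain ⟨ha, hbn⟩ := hab h
    simp only [if_pos h]
    rw [PySem.List.sum_map_add_int, sum_indicator, sum_indicator]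
    by_cases h1 : a ≤ (p : Int)
    · rw [if_pos (by omega)]
      by_cases h2 : (p : Int) < b
      · rw [if_neg (by omega), if_pos (by omega)]; ring
      · rw [if_pos (by omega), if_neg (by omega)]; ring
    · rw [if_neg (by omega), if_neg (by omega), if_neg (by omega)]; ring
  · simp only [if_neg h]
    rw [if_neg (by omega)]
    simp

theorem getD_replicate_zero (m j : Nat) : (List.replicate m (0 : Int)).getD j 0 = 0 := by
  by_cases hj : j < m
  · rw [List.getD_eq_getElem _ _ (by simpa using hj), List.getElem_replicate]
  · rw [List.getD_eq_default _ _ (by simpa using hj)]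

theorem list_eq_of_getD (xs ys : List Int) (hl : xs.length = ys.length)
    (h : ∀ j : Nat, j < xs.length → xs.getD j 0 = ys.getD j 0) : xs = ys := by
  apply List.ext_getElem hl
  intro i h1 h2
  rw [← List.getD_eq_getElem xs 0 h1, ← List.getD_eq_getElem ys 0 h2]
  exact h i h1

-- B's per-allele computation: endpoint difference array + prefix-sum sweep, pointwise
theorem B_inner (C : List String) (Rf : String → List (Int × Int)) (cf : String → Int)
    (al : List Int)
    (hb : ∀ k ∈ C, ∀ iv ∈ Rf k, iv.1 < iv.2 → 0 ≤ iv.1 ∧ iv.2 ≤ (al.length : Int)) :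
    ((PySem.List.enumerate al 0).foldl
      (fun (st : List Int × Int) pv =>
        (st.1 ++ [pv.2 + (st.2 + PySem.List.pyGetD
            (C.foldl (fun d k => (Rf k).foldl (fun diff iv =>
              if iv.1 < iv.2 then
                PySem.List.pySetD (PySem.List.pySetD diff iv.1 (PySem.List.pyGetD diff iv.1 0 - cf k)) iv.2
                  (PySem.List.pyGetD (PySem.List.pySetD diff iv.1 (PySem.List.pyGetD diff iv.1 0 - cf k)) iv.2 0 + cf k)
              else diff) d) (List.replicate (al.length + 1) (0 : Int)))
            pv.1 0)],
         st.2 + PySem.List.pyGetD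
            (C.foldl (fun d k => (Rf k).foldl (fun diff iv =>
              if iv.1 < iv.2 then
                PySem.List.pySetD (PySem.List.pySetD diff iv.1 (PySem.List.pyGetD diff iv.1 0 - cf k)) iv.2
                  (PySem.List.pyGetD (PySem.List.pySetD diff iv.1 (PySem.List.pyGetD diff iv.1 0 - cf k)) iv.2 0 + cf k)
              else diff) d) (List.replicate (al.length + 1) (0 : Int)))
            pv.1 0)) (([] : List Int), (0 : Int))).1
    = (List.range al.length).map (fun j =>
        al.getD j 0 + (C.map (fun k => ((Rf k).map (fun iv =>
          if iv.1 ≤ (j : Int) ∧ (j : Int) < iv.2 then -(cf k) else 0)).sum)).sum) := by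
  set diff := C.foldl (fun d k => (Rf k).foldl (fun diff iv =>
      if iv.1 < iv.2 then
        PySem.List.pySetD (PySem.List.pySetD diff iv.1 (PySem.List.pyGetD diff iv.1 0 - cf k)) iv.2
          (PySem.List.pyGetD (PySem.List.pySetD diff iv.1 (PySem.List.pyGetD diff iv.1 0 - cf k)) iv.2 0 + cf k)
      else diff) d) (List.replicate (al.length + 1) (0 : Int)) with hdiff
  obtain ⟨hdl, hdpt⟩ := diff_all C Rf cf al.length (List.replicate (al.length + 1) (0 : Int))
    (by simp) hb
  rw [← hdiff] at hdl hdpt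
  have hsw := sweep_foldl diff al 0 [] 0
  rw [hsw]
  simp only [List.nil_append]
  apply List.map_congr_left
  intro p hp
  rw [List.mem_range] at hp
  have hsum : ∀ u : Nat, u < al.length + 1 →
      PySem.List.pyGetD diff ((0 : Int) + (u : Nat)) 0
      = (C.map (fun k => ((Rf k).map (fun iv =>
          if iv.1 < iv.2 then
            (if iv.1 = (u : Int) then -(cf k) else 0) + (if iv.2 = (u : Int) then cf k else 0)
          else 0)).sum)).sum := by
    intro u hu
    rw [zero_add, PySem.List.pyGetD_natCast, hdpt u hu, getD_replicate_zero, zero_add]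
  have hrw : ((List.range (p + 1)).map (fun u : Nat => PySem.List.pyGetD diff ((0 : Int) + (u : Nat)) 0)).sum
      = ((List.range (p + 1)).map (fun u : Nat => (C.map (fun k => ((Rf k).map (fun iv =>
          if iv.1 < iv.2 then
            (if iv.1 = (u : Int) then -(cf k) else 0) + (if iv.2 = (u : Int) then cf k else 0)
          else 0)).sum)).sum)).sum := by
    refine congrArg List.sum (List.map_congr_left ?_)
    intro u hu
    rw [List.mem_range] at hu
    exact hsum u (by omega)
  rw [hrw, sum_exchange C (List.range (p + 1))
    (fun k u => ((Rf k).map (fun iv =>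
      if iv.1 < iv.2 then
        (if iv.1 = (u : Int) then -(cf k) else 0) + (if iv.2 = (u : Int) then cf k else 0)
      else 0)).sum)]
  rw [add_zero]
  congr 1
  refine congrArg List.sum (List.map_congr_left ?_)
  intro k hk
  rw [sum_exchange (Rf k) (List.range (p + 1))
    (fun iv u => if iv.1 < iv.2 then
      (if iv.1 = (u : Int) then -(cf k) else 0) + (if iv.2 = (u : Int) then cf k else 0)
    else 0)]
  refine congrArg List.sum (List.map_congr_left ?_)
  intro iv hiv
  exact pair_sum (cf k) iv.1 iv.2 al.length p (hb k hk iv hiv)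

-- A's per-allele computation in the same closed form
theorem A_inner_closed (C : List String) (Rf : String → List (Int × Int)) (cf : String → Int)
    (al : List Int)
    (hb : ∀ k ∈ C, ∀ iv ∈ Rf k, iv.1 < iv.2 → 0 ≤ iv.1 ∧ iv.2 ≤ (al.length : Int)) :
    C.foldl (fun al k => pyCoverage al (Rf k) (-1 * cf k)) al
    = (List.range al.length).map (fun j =>
        al.getD j 0 + (C.map (fun k => ((Rf k).map (fun iv =>
          if iv.1 ≤ (j : Int) ∧ (j : Int) < iv.2 then -(cf k) else 0)).sum)).sum) := by
  obtain ⟨hlen, hpt⟩ := A_inner C Rf cf al hb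
  apply list_eq_of_getD
  · rw [hlen, List.length_map, List.length_range]
  · intro j hj
    rw [hlen] at hj
    rw [PySem.List.getD_map_range _ _ _ _ (by omega), hpt j hj]
    congr 1
    refine congrArg List.sum (List.map_congr_left ?_)
    intro k hk
    refine congrArg List.sum (List.map_congr_left ?_)
    intro iv hiv
    split_ifs <;> ring

theorem foldl_inter (pools : List (List String)) (u : List String) :
    pools.foldl (fun s v => PySem.Set.inter s v) u
    = u.filter (fun k => pools.all (fun pool => pool.contains k)) := by
  induction pools generalizing u with
  | nil => simp
  | cons p ps ih =>
    simp only [List.foldl_cons]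
    rw [ih]
    show (u.filter (fun x => p.contains x)).filter _ = _
    rw [List.filter_filter]
    apply List.filter_congr
    intro k hk
    simp [List.all_cons, Bool.and_comm]

theorem common_eq (pools : List (List String)) :
    PySem.Set.ofList (pools.foldl (fun s v => PySem.Set.inter s v) (PySem.Set.ofList pools.flatten))
    = (PySem.List.dedup pools.flatten).filter (fun k => pools.all (fun pool => pool.contains k)) := by
  rw [foldl_inter, PySem.List.dedup_eq_ofList]
  exact PySem.Set.ofList_eq_self_of_nodup _ (List.Nodup.filter _ (PySem.Set.nodup_ofList _))

theorem dGetD_of_mem {β : Type} (d : List (String × β)) (k : String) (v : β) (dflt : β)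
    (hnd : (d.map Prod.fst).Nodup) (h : (k, v) ∈ d) : dGetD d k dflt = v := by
  unfold dGetD
  refine PySem.Dict.getD_of_mem_items _ h ?_ dflt
  rw [PySem.Dict.keys_mk]
  exact hnd

theorem glue (allele_matches : List (String × List (String × List Int))) (alleles_kmers : List (String × List (String × List String))) (kmer_scheme : List (String × List (String × List (String × List (Int × Int))))) (kmer_counts : List (String × Int))
    (hpre : Pre_refine_matches allele_matches alleles_kmers kmer_scheme kmer_counts) :
    refine_matches allele_matches alleles_kmers kmer_scheme kmer_counts
    = refine_matches_alt allele_matches alleles_kmers kmer_scheme kmer_counts := by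
  obtain ⟨hnd, hloc⟩ := hpre
  unfold refine_matches refine_matches_alt
  simp only [PySem.List.foldl_append_singleton_eq_map, List.nil_append]
  apply List.map_congr_left
  intro la hla
  simp only [Prod.mk.injEq, true_and]
  apply List.map_congr_left
  intro aa haa
  obtain ⟨⟨hndin, hhas⟩, hrest⟩ := hloc la hla
  simp only [Prod.mk.injEq, true_and]
  have hinit1 : dGetD allele_matches la.1 [] = la.2 :=
    dGetD_of_mem _ _ _ _ hnd (by rw [Prod.mk.eta]; exact hla)
  have hinit2 : dGetD la.2 aa.1 [] = aa.2 :=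
    dGetD_of_mem _ _ _ _ hndin (by rw [Prod.mk.eta]; exact haa)
  rw [common_eq, hinit1, hinit2]
  set pools := (dGetD alleles_kmers la.1 []).map Prod.snd with hpools
  set C := (PySem.List.dedup pools.flatten).filter
      (fun k => pools.all (fun pool => pool.contains k)) with hC
  have hb : ∀ k ∈ C, ∀ iv ∈ (fun k => dGetD (dGetD (dGetD kmer_scheme k []) la.1 []) aa.1 []) k,
      iv.1 < iv.2 → 0 ≤ iv.1 ∧ iv.2 ≤ (aa.2.length : Int) := by
    intro k hk
    rw [hC, List.mem_filter] at hk
    obtain ⟨hkd, hkall⟩ := hk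
    have hkfl : k ∈ pools.flatten := (PySem.List.mem_dedup _ _).mp hkd
    have hcom : isCommon pools k = true := by
      unfold isCommon
      rw [Bool.and_eq_true]
      refine ⟨?_, hkall⟩
      rw [List.any_eq_true]
      obtain ⟨pool, hpool, hkp⟩ := List.mem_flatten.mp hkfl
      exact ⟨pool, hpool, by simpa using hkp⟩
    exact (hrest aa haa k hkfl hcom).2.2.2.2
  rw [A_inner_closed C
      (fun k => dGetD (dGetD (dGetD kmer_scheme k []) la.1 []) aa.1 [])
      (fun k => dGetD kmer_counts k 0) aa.2 hb,
    B_inner C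
      (fun k => dGetD (dGetD (dGetD kmer_scheme k []) la.1 []) aa.1 [])
      (fun k => dGetD kmer_counts k 0) aa.2 hb]

-- ===== VERDICT (by name: the statement is the Claim_ definition above) =====
theorem refine_matches_spec : Claim_equal_refine_matches := by
  intro allele_matches alleles_kmers kmer_scheme kmer_counts hdom hpre
  show refine_matches _ _ _ _ = refine_matches_alt _ _ _ _
  exact glue _ _ _ _ hpre
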